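-- pv_equiv track=rewrite | github.com/daniel-reich/turbo-robot | E9FwvGyad5CDbiH4C_23.py | block
-- ===== SOURCE A (Python) =====
-- def block(lst):
--     x=[]
--     for i in lst:
--         for j in i:
--             if j==2:
--                 if lst.index(i)!=len(lst)-1:
--                     x.append((lst.index(i)))
--     return sum([abs(i-len(lst))-1 for i in x])
-- ===== SOURCE B (Python) =====
-- def block(lst):
--     total = 0
--     seen = 0
--     for row in lst:
--         total += seen
--         seen += row.count(2)
--     return total
-- ===== Notes on version B (the rewrite author's own statement) =====
-- stated objective: simpler
-- what changed: Replaces the nested scan with repeated lst.index calls and the intermediate list of indices by a single telescoping pass that keeps a running count of 2s seen so far and adds it per row (each 2 contributes once for every later row), using no indices at all.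
-- intended difference: On lists where some row containing a 2 duplicates an earlier row, A weights every copy of that row by the FIRST occurrence's index (the classic lst.index-inside-a-loop bug) and returns a larger sum (e.g. 2 on [[2],[2]]); B weights each row by its own position (1 there), which is the intended per-row distance to the end. — e.g. on block([[2], [2]]): A returns 2, B returns 1
import Mathlib
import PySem

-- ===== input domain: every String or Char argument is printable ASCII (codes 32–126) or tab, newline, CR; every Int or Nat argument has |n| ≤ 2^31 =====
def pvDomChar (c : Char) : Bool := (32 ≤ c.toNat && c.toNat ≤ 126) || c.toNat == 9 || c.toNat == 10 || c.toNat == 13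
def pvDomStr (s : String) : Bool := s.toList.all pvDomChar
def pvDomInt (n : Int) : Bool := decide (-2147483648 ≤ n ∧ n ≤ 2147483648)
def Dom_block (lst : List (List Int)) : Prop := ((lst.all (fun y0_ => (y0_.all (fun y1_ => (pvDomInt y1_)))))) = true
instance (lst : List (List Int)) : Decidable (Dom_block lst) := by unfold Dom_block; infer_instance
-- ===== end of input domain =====

-- B is a single telescoping pass (each 2 contributes once per later row) instead of A's
-- nested scan with repeated lst.index calls; B fixes A's first-occurrence bug on duplicate rows.

-- ===== PORT A =====
def block (lst : List (List Int)) : Int :=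
  let x : List Int := lst.foldl (fun x i =>
    i.foldl (fun x j =>
      if j == 2 then
        if (((PySem.List.index? lst i).getD 0 : Nat) : Int) ≠ (lst.length : Int) - 1 then
          x ++ [(((PySem.List.index? lst i).getD 0 : Nat) : Int)]
        else x
      else x) x) []
  (x.map (fun i => |i - (lst.length : Int)| - 1)).sum

-- ===== PORT B =====
def block_alt (lst : List (List Int)) : Int :=
  (lst.foldl (fun (p : Int × Int) row => (p.1 + p.2, p.2 + (row.count 2 : Int))) (0, 0)).1

-- ===== PRECONDITION & SPEC =====
-- On lists where some row containing a 2 duplicates an earlier row, A weights every copy of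
-- that row by the FIRST occurrence's index (the lst.index-inside-a-loop bug) and returns a
-- larger sum; B weights each row by its own position, the intended distance to the end.
def D_block (lst : List (List Int)) : Prop :=
  ¬ List.Pairwise (fun a b : List Int => a = b → ¬ (2 ∈ a)) lst
instance (lst : List (List Int)) : Decidable (D_block lst) := by unfold D_block; infer_instance
def Spec_block (lst : List (List Int)) (out : Int) : Prop := ¬ D_block lst → out = block_alt lst
instance (lst : List (List Int)) (out : Int) : Decidable (Spec_block lst out) := by unfold Spec_block; infer_instance
def pvDiffWitness_block : List (List Int) := [[2], [2]]
def pvDiffWitnessOut_block : Int × Int := (2, 1)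

-- ===== CLAIM (what is proved, stated in full; the proofs are below) =====
def Claim_unchanged_block : Prop := ∀ (lst : List (List Int)), Dom_block lst → Spec_block lst (block lst)
def Claim_changed_block : Prop := Dom_block (pvDiffWitness_block) ∧ D_block (pvDiffWitness_block) ∧ block (pvDiffWitness_block) = pvDiffWitnessOut_block.1 ∧ block_alt (pvDiffWitness_block) = pvDiffWitnessOut_block.2 ∧ pvDiffWitnessOut_block.1 ≠ pvDiffWitnessOut_block.2
def Claim_exact_block : Prop := ∀ (lst : List (List Int)), Dom_block lst → D_block lst → block lst ≠ block_alt lst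

-- ===== LEMMAS AND PROOFS =====

theorem sum_flatMap' {α : Type} (l : List α) (g : α → List Int) :
    (l.flatMap g).sum = (l.map (fun a => (g a).sum)).sum := by
  induction l with
  | nil => simp
  | cons x l ih => simp [List.flatMap_cons, ih]

-- A's per-row contribution (first-occurrence index k, weight n-k-1 per 2 in the row)
def rowVal (lst : List (List Int)) (r : List Int) : Int :=
  let k : Int := ((PySem.List.index? lst r).getD 0 : Nat)
  if k ≠ (lst.length : Int) - 1 then (r.count 2 : Int) * ((lst.length : Int) - k - 1) else 0

theorem block_eq_sum (lst : List (List Int)) :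
    block lst = (lst.map (rowVal lst)).sum := by
  unfold block
  show ((lst.foldl (fun x i =>
      i.foldl (fun x j =>
        if j == 2 then
          if (((PySem.List.index? lst i).getD 0 : Nat) : Int) ≠ (lst.length : Int) - 1 then
            x ++ [(((PySem.List.index? lst i).getD 0 : Nat) : Int)]
          else x
        else x) x) []).map (fun i => |i - (lst.length : Int)| - 1)).sum = _
  have hinner : ∀ (acc : List Int) (i : List Int), i ∈ lst →
      (i.foldl (fun x j =>
        if j == 2 then
          if (((PySem.List.index? lst i).getD 0 : Nat) : Int) ≠ (lst.length : Int) - 1 then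
            x ++ [(((PySem.List.index? lst i).getD 0 : Nat) : Int)]
          else x
        else x) acc)
      = acc ++ (if (((PySem.List.index? lst i).getD 0 : Nat) : Int) ≠ (lst.length : Int) - 1 then
        (i.filter (· == 2)).map (fun _ => (((PySem.List.index? lst i).getD 0 : Nat) : Int)) else []) := by
    intro acc i _
    by_cases hc : (((PySem.List.index? lst i).getD 0 : Nat) : Int) ≠ (lst.length : Int) - 1
    · simp only [if_pos hc]
      exact PySem.List.foldl_append_if (fun j => j == 2) _ i acc
    · simp only [if_neg hc, ite_self, List.append_nil]
      induction i generalizing acc <;> simp [*]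
  have hfold : lst.foldl (fun x i =>
      i.foldl (fun x j =>
        if j == 2 then
          if (((PySem.List.index? lst i).getD 0 : Nat) : Int) ≠ (lst.length : Int) - 1 then
            x ++ [(((PySem.List.index? lst i).getD 0 : Nat) : Int)]
          else x
        else x) x) ([] : List Int)
      = lst.foldl (fun x i =>
        x ++ (if (((PySem.List.index? lst i).getD 0 : Nat) : Int) ≠ (lst.length : Int) - 1 then
          (i.filter (· == 2)).map (fun _ => (((PySem.List.index? lst i).getD 0 : Nat) : Int)) else [])) [] :=
    PySem.List.foldl_congr_mem _ _ _ _ hinner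
  rw [hfold]
  rw [PySem.List.foldl_append_eq_flatMap]
  rw [List.nil_append, List.map_flatMap]
  rw [sum_flatMap']
  apply congrArg
  apply List.map_congr_left
  intro r hr
  obtain ⟨k, hk⟩ : ∃ k, PySem.List.index? lst r = some k := by
    rcases Option.isSome_iff_exists.mp ((PySem.List.index?_isSome_iff _ _).mpr hr) with ⟨k, h⟩
    exact ⟨k, h⟩
  obtain ⟨hklt, -, -⟩ := PySem.List.getElem_of_index?_eq_some hk
  unfold rowVal
  rw [hk]
  simp only [Option.getD_some]
  by_cases hc : ((k : Int)) ≠ (lst.length : Int) - 1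
  · rw [if_pos hc, if_pos hc]
    rw [List.map_map]
    have hfun : ((fun i => |i - (lst.length : Int)| - 1) ∘ fun (_ : Int) => (k : Int))
        = fun (_ : Int) => ((lst.length : Int) - k - 1) := by
      funext x
      simp only [Function.comp]
      rw [abs_of_nonpos (by omega : (k : Int) - (lst.length : Int) ≤ 0)]
      ring
    rw [hfun, PySem.List.sum_map_const_int]
    have hcnt : (r.filter (fun x => x == 2)).length = r.count 2 := by
      simp [List.count_eq_countP, List.countP_eq_length_filter]
    rw [hcnt]
  · rw [if_neg hc, if_neg hc]; simp

-- B's value: each row's count of 2s times the number of rows after it (telescoped sum)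
def W : List (List Int) → Int
  | [] => 0
  | r :: l => (r.count 2 : Int) * (l.length : Int) + W l

theorem alt_fold (l : List (List Int)) (t s : Int) :
    (l.foldl (fun (p : Int × Int) row => (p.1 + p.2, p.2 + (row.count 2 : Int))) (t, s)).1
      = t + s * (l.length : Int) + W l := by
  induction l generalizing t s with
  | nil => simp [W]
  | cons r l ih =>
    simp only [List.foldl_cons, W]
    rw [ih]
    simp only [List.length_cons]
    push_cast
    ring

theorem block_alt_eq_W (lst : List (List Int)) : block_alt lst = W lst := by
  unfold block_alt
  rw [alt_fold]
  ring

theorem sum_eq_W (l : List (List Int)) (f : List Int → Int)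
    (h : ∀ (i : Nat) (hi : i < l.length),
      f l[i] = (l[i].count 2 : Int) * ((l.length : Int) - 1 - (i : Int))) :
    (l.map f).sum = W l := by
  induction l with
  | nil => simp [W]
  | cons r l ih =>
    simp only [List.map_cons, List.sum_cons, W]
    have h0 := h 0 (by simp)
    simp only [List.getElem_cons_zero, List.length_cons] at h0
    rw [h0, ih (fun i hi => by
      have := h (i + 1) (by simpa using Nat.succ_lt_succ hi)
      simp only [List.getElem_cons_succ, List.length_cons] at this
      rw [this]; push_cast; ring)]
    push_cast
    ring

theorem index?_self_of_pairwise (lst : List (List Int))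
    (hp : List.Pairwise (fun a b : List Int => a = b → ¬ (2 ∈ a)) lst)
    (i : Nat) (hi : i < lst.length) (h2 : 2 ∈ lst[i]) :
    PySem.List.index? lst lst[i] = some i := by
  obtain ⟨k, hk⟩ : ∃ k, PySem.List.index? lst lst[i] = some k := by
    rcases Option.isSome_iff_exists.mp
      ((PySem.List.index?_isSome_iff _ _).mpr (List.getElem_mem hi)) with ⟨k, h⟩
    exact ⟨k, h⟩
  obtain ⟨hklt, hkeq, hmin⟩ := PySem.List.getElem_of_index?_eq_some hk
  rcases lt_trichotomy k i with hlt | heq | hgt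
  · exfalso
    have := (List.pairwise_iff_getElem.mp hp) k i hklt hi hlt
    exact this hkeq (hkeq ▸ h2)
  · rw [hk, heq]
  · exact absurd rfl (hmin i hgt)

theorem rowVal_eq (lst : List (List Int))
    (hp : List.Pairwise (fun a b : List Int => a = b → ¬ (2 ∈ a)) lst)
    (i : Nat) (hi : i < lst.length) :
    rowVal lst lst[i] = (lst[i].count 2 : Int) * ((lst.length : Int) - 1 - (i : Int)) := by
  by_cases h2 : 2 ∈ lst[i]
  · unfold rowVal
    rw [index?_self_of_pairwise lst hp i hi h2]
    simp only [Option.getD_some]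
    by_cases hc : ((i : Int)) ≠ (lst.length : Int) - 1
    · rw [if_pos hc]; ring
    · rw [if_neg hc]
      push_neg at hc
      rw [← hc]
      ring
  · have hc0 : lst[i].count 2 = 0 := List.count_eq_zero.mpr h2
    unfold rowVal
    rw [hc0]
    simp

-- for tightness: A's per-row value always dominates B's, strictly at a duplicated 2-row
theorem rowVal_ge (lst : List (List Int)) (i : Nat) (hi : i < lst.length) :
    (lst[i].count 2 : Int) * ((lst.length : Int) - 1 - (i : Int)) ≤ rowVal lst lst[i] := by
  obtain ⟨k, hk⟩ : ∃ k, PySem.List.index? lst lst[i] = some k := by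
    rcases Option.isSome_iff_exists.mp
      ((PySem.List.index?_isSome_iff _ _).mpr (List.getElem_mem hi)) with ⟨k, h⟩
    exact ⟨k, h⟩
  obtain ⟨hklt, hkeq, hmin⟩ := PySem.List.getElem_of_index?_eq_some hk
  have hki : k ≤ i := by
    by_contra h
    exact absurd rfl (hmin i (by omega))
  unfold rowVal
  rw [hk]
  simp only [Option.getD_some]
  by_cases hc : ((k : Int)) ≠ (lst.length : Int) - 1
  · rw [if_pos hc]
    have : (0 : Int) ≤ (lst[i].count 2 : Int) := by positivity
    nlinarith [this]
  · rw [if_neg hc]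
    push_neg at hc
    have hin : i = lst.length - 1 := by omega
    have : ((lst.length : Int) - 1 - (i : Int)) = 0 := by omega
    rw [this]
    simp

theorem sum_gt_W (l : List (List Int)) (f : List Int → Int)
    (hge : ∀ (i : Nat) (hi : i < l.length),
      (l[i].count 2 : Int) * ((l.length : Int) - 1 - (i : Int)) ≤ f l[i])
    (hgt : ∃ (i : Nat) (hi : i < l.length),
      (l[i].count 2 : Int) * ((l.length : Int) - 1 - (i : Int)) < f l[i]) :
    W l < (l.map f).sum := by
  induction l with
  | nil => rcases hgt with ⟨i, hi, _⟩; exact absurd hi (by simp)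
  | cons r l ih =>
    simp only [List.map_cons, List.sum_cons, W]
    have h0 := hge 0 (by simp)
    simp only [List.getElem_cons_zero, List.length_cons] at h0
    push_cast at h0
    have htail_ge : ∀ (i : Nat) (hi : i < l.length),
        (l[i].count 2 : Int) * ((l.length : Int) - 1 - (i : Int)) ≤ f l[i] := by
      intro i hi
      have := hge (i + 1) (by simpa using Nat.succ_lt_succ hi)
      simp only [List.getElem_cons_succ, List.length_cons] at this
      calc (l[i].count 2 : Int) * ((l.length : Int) - 1 - (i : Int))
          = (l[i].count 2 : Int) * (((l.length : Int) + 1) - 1 - ((i : Int) + 1)) := by ring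
        _ ≤ f l[i] := by push_cast at this ⊢; exact this
    have htail_le : W l ≤ (l.map f).sum := by
      by_cases h : ∃ (i : Nat) (hi : i < l.length),
          (l[i].count 2 : Int) * ((l.length : Int) - 1 - (i : Int)) < f l[i]
      · exact le_of_lt (ih htail_ge h)
      · push_neg at h
        have : ∀ (i : Nat) (hi : i < l.length),
            f l[i] = (l[i].count 2 : Int) * ((l.length : Int) - 1 - (i : Int)) := by
          intro i hi
          exact le_antisymm (h i hi) (htail_ge i hi)
        rw [sum_eq_W l f this]
    rcases hgt with ⟨i, hi, hlt⟩
    match i with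
    | 0 =>
      simp only [List.getElem_cons_zero, List.length_cons] at hlt
      have : (r.count 2 : Int) * ((l.length : Int)) < f r := by
        calc (r.count 2 : Int) * ((l.length : Int))
            = (r.count 2 : Int) * (((l.length : Int) + 1) - 1 - ((0:Nat) : Int)) := by push_cast; ring
          _ < f r := by push_cast at hlt ⊢; exact hlt
      linarith
    | i + 1 =>
      simp only [List.getElem_cons_succ, List.length_cons] at hlt
      have hi' : i < l.length := by simpa using Nat.lt_of_succ_lt_succ hi
      have hstr : W l < (l.map f).sum := by
        apply ih htail_ge
        refine ⟨i, hi', ?_⟩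
        calc (l[i].count 2 : Int) * ((l.length : Int) - 1 - (i : Int))
            = (l[i].count 2 : Int) * (((l.length : Int) + 1) - 1 - (((i : Int)) + 1)) := by ring
          _ < f l[i] := by push_cast at hlt ⊢; exact hlt
      linarith [h0]

theorem rowVal_gt (lst : List (List Int)) (hD : D_block lst) :
    ∃ (i : Nat) (hi : i < lst.length),
      (lst[i].count 2 : Int) * ((lst.length : Int) - 1 - (i : Int)) < rowVal lst lst[i] := by
  unfold D_block at hD
  rw [List.pairwise_iff_getElem] at hD
  push_neg at hD
  obtain ⟨a, b, ha, hb, hab, heq, h2⟩ := hD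
  -- lst[a] = lst[b], a < b, 2 ∈ lst[a]; position b is strictly overweighted by A
  refine ⟨b, hb, ?_⟩
  obtain ⟨k, hk⟩ : ∃ k, PySem.List.index? lst lst[b] = some k := by
    rcases Option.isSome_iff_exists.mp
      ((PySem.List.index?_isSome_iff _ _).mpr (List.getElem_mem hb)) with ⟨k, h⟩
    exact ⟨k, h⟩
  obtain ⟨hklt, hkeq, hmin⟩ := PySem.List.getElem_of_index?_eq_some hk
  have hka : k ≤ a := by
    by_contra h
    exact hmin a (by omega) heq
  have hkb : k < b := by omega
  have hc2 : 1 ≤ (lst[b].count 2 : Int) := by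
    have : 0 < lst[b].count 2 := List.count_pos_iff.mpr (heq ▸ h2)
    exact_mod_cast this
  unfold rowVal
  rw [hk]
  simp only [Option.getD_some]
  have hc : ((k : Int)) ≠ (lst.length : Int) - 1 := by omega
  rw [if_pos hc]
  have hw : ((lst.length : Int) - 1 - (b : Int)) < ((lst.length : Int) - (k : Int) - 1) := by omega
  have h0 : (0 : Int) ≤ (lst.length : Int) - 1 - (b : Int) := by omega
  nlinarith

-- ===== VERDICT (by name: the statements are the Claim_ definitions above) =====
theorem block_spec : Claim_unchanged_block := by
  intro lst _ hnD
  unfold D_block at hnD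
  push_neg at hnD
  rw [block_eq_sum, block_alt_eq_W]
  exact sum_eq_W lst (rowVal lst) (fun i hi => rowVal_eq lst hnD i hi)

theorem block_changed : Claim_changed_block := by
  unfold Claim_changed_block; decide

theorem block_tight : Claim_exact_block := by
  intro lst _ hD
  rw [block_eq_sum, block_alt_eq_W]
  have := sum_gt_W lst (rowVal lst) (fun i hi => rowVal_ge lst i hi) (rowVal_gt lst hD)
  omega
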